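-- pv_equiv track=rewrite | github.com/paulchernoch/paulchernoch | source/build-website.py | citations_for_one_book
-- ===== SOURCE A (Python) =====
-- def book_chapter_counts() -> dict:
--   return {
--     'Genesis': 50,
--     'Exodus': 40,
--     'Leviticus': 27,
--     'Numbers': 36,
--     'Deuteronomy': 34,
--     'Joshua': 24,
--     'Judges': 21,
--     'Ruth': 4,
--     '1 Samuel': 31,
--     '2 Samuel': 24,
--     '1 Kings': 22,
--     '2 Kings': 25,
--     '1 Chronicles': 29,
--     '2 Chronicles': 36,
--     'Ezra': 10,
--     'Nehemiah': 13,
--     'Esther': 10,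
--     'Job': 42,
--     'Psalms': 150,
--     'Proverbs': 31,
--     'Ecclesiastes': 12,
--     'Song of Solomon': 8,
--     'Isaiah': 66,
--     'Jeremiah': 52,
--     'Lamentations': 5,
--     'Ezekiel': 48,
--     'Daniel': 12,
--     'Hosea': 14,
--     'Joel': 3,
--     'Amos': 9,
--     'Obadiah': 1,
--     'Jonah': 4,
--     'Micah': 7,
--     'Nahum': 3,
--     'Habakkuk': 3,
--     'Zephaniah': 3,
--     'Haggai': 2,
--     'Zechariah': 14,
--     'Malachi': 4,
--     'Matthew': 28,
--     'Mark': 16,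
--     'Luke': 24,
--     'John': 21,
--     'Acts': 28,
--     'Romans': 16,
--     '1 Corinthians': 16,
--     '2 Corinthians': 13,
--     'Galatians': 6,
--     'Ephesians': 6,
--     'Philippians': 4,
--     'Colossians': 4,
--     '1 Thessalonians': 5,
--     '2 Thessalonians': 3,
--     '1 Timothy': 6,
--     '2 Timothy': 4,
--     'Titus': 3,
--     'Philemon': 1,
--     'Hebrews': 13,
--     'James': 5,
--     '1 Peter': 5,
--     '2 Peter': 3,
--     '1 John': 5,
--     '2 John': 1,
--     '3 John': 1,
--     'Jude': 1,
--     'Revelation': 22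
--   }
--
-- def citations_for_one_book(book: str, citations: dict) -> str:
--   chapters = book_chapter_counts()
--   citation_html = ''
--   citation_html += f'  <details class="citations article">\n'
--   citation_html += f'    <summary><h2>{book}</h2></summary>\n'
--   citation_html += f'      <p><ul>\n'
--   book_citations = citations[book]
--   for chapter in range(1,chapters[book]+1):
--     if chapter in book_citations:
--       book_chapter_citations = book_citations[chapter]
--       citation_html += f'        <li>Chapter {chapter}\n        <ul>\n'
--       for citation in book_chapter_citations:
--         file = citation['filename']
--         title = citation['title']
--         citation_html += f'            <li><a href="{file}">{title}</a></li>\n'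
--       citation_html += f'          </ul>\n        </li>\n'
--   citation_html += f'      </ul></p>\n'
--   citation_html += f'    </summary>\n'
--   citation_html += f'  </details>\n'
--   return citation_html
-- ===== SOURCE B (Python) =====
-- def book_chapter_counts() -> dict:
--   return {
--     'Genesis': 50, 'Exodus': 40, 'Leviticus': 27, 'Numbers': 36, 'Deuteronomy': 34,
--     'Joshua': 24, 'Judges': 21, 'Ruth': 4, '1 Samuel': 31, '2 Samuel': 24,
--     '1 Kings': 22, '2 Kings': 25, '1 Chronicles': 29, '2 Chronicles': 36, 'Ezra': 10,
--     'Nehemiah': 13, 'Esther': 10, 'Job': 42, 'Psalms': 150, 'Proverbs': 31,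
--     'Ecclesiastes': 12, 'Song of Solomon': 8, 'Isaiah': 66, 'Jeremiah': 52,
--     'Lamentations': 5, 'Ezekiel': 48, 'Daniel': 12, 'Hosea': 14, 'Joel': 3,
--     'Amos': 9, 'Obadiah': 1, 'Jonah': 4, 'Micah': 7, 'Nahum': 3, 'Habakkuk': 3,
--     'Zephaniah': 3, 'Haggai': 2, 'Zechariah': 14, 'Malachi': 4, 'Matthew': 28,
--     'Mark': 16, 'Luke': 24, 'John': 21, 'Acts': 28, 'Romans': 16,
--     '1 Corinthians': 16, '2 Corinthians': 13, 'Galatians': 6, 'Ephesians': 6,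
--     'Philippians': 4, 'Colossians': 4, '1 Thessalonians': 5, '2 Thessalonians': 3,
--     '1 Timothy': 6, '2 Timothy': 4, 'Titus': 3, 'Philemon': 1, 'Hebrews': 13,
--     'James': 5, '1 Peter': 5, '2 Peter': 3, '1 John': 5, '2 John': 1, '3 John': 1,
--     'Jude': 1, 'Revelation': 22
--   }
--
-- def citations_for_one_book(book: str, citations: dict) -> str:
--   n = book_chapter_counts()[book]
--   book_citations = citations[book]
--   present = sorted(ch for ch in book_citations if 1 <= ch <= n)
--
--   def chapter_block(ch):
--     items = ''.join(
--         f'            <li><a href="{c["filename"]}">{c["title"]}</a></li>\n'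
--         for c in book_citations[ch])
--     return f'        <li>Chapter {ch}\n        <ul>\n{items}          </ul>\n        </li>\n'
--
--   return ('  <details class="citations article">\n'
--           + f'    <summary><h2>{book}</h2></summary>\n'
--           + '      <p><ul>\n'
--           + ''.join(chapter_block(ch) for ch in present)
--           + '      </ul></p>\n'
--           + '    </summary>\n'
--           + '  </details>\n')
-- ===== Notes on version B (the rewrite author's own statement) =====
-- stated objective: simpler
-- what changed: Instead of scanning every chapter number from 1 to the book's chapter count and testing dict membership, B collects the cited chapter keys that lie in range, sorts them, and joins one block per cited chapter; the membership branch disappears and the loop runs over the cited chapters only.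
import Mathlib
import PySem

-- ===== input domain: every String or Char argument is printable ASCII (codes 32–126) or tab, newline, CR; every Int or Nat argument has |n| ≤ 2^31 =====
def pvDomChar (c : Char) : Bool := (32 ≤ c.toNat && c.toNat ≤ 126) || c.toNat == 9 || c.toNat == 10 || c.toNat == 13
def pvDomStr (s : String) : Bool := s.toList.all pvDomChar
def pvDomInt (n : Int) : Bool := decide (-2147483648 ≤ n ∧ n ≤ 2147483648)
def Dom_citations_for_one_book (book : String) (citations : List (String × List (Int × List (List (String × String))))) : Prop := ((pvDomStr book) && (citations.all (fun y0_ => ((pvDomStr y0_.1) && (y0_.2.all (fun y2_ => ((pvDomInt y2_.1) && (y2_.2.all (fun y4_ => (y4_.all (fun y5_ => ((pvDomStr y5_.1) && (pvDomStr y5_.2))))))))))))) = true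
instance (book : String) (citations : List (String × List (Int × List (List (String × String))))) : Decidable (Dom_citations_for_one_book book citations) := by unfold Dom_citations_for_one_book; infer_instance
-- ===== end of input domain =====

-- B builds the same HTML from the sorted list of cited in-range chapters instead of
-- scanning all chapter numbers 1..count with a membership test (objective: simpler).

-- shared helper: the literal table returned by book_chapter_counts()
def bookChapterCounts : List (String × Int) :=
  [("Genesis", 50), ("Exodus", 40), ("Leviticus", 27), ("Numbers", 36), ("Deuteronomy", 34),
   ("Joshua", 24), ("Judges", 21), ("Ruth", 4), ("1 Samuel", 31), ("2 Samuel", 24),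
   ("1 Kings", 22), ("2 Kings", 25), ("1 Chronicles", 29), ("2 Chronicles", 36), ("Ezra", 10),
   ("Nehemiah", 13), ("Esther", 10), ("Job", 42), ("Psalms", 150), ("Proverbs", 31),
   ("Ecclesiastes", 12), ("Song of Solomon", 8), ("Isaiah", 66), ("Jeremiah", 52),
   ("Lamentations", 5), ("Ezekiel", 48), ("Daniel", 12), ("Hosea", 14), ("Joel", 3),
   ("Amos", 9), ("Obadiah", 1), ("Jonah", 4), ("Micah", 7), ("Nahum", 3), ("Habakkuk", 3),
   ("Zephaniah", 3), ("Haggai", 2), ("Zechariah", 14), ("Malachi", 4), ("Matthew", 28),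
   ("Mark", 16), ("Luke", 24), ("John", 21), ("Acts", 28), ("Romans", 16),
   ("1 Corinthians", 16), ("2 Corinthians", 13), ("Galatians", 6), ("Ephesians", 6),
   ("Philippians", 4), ("Colossians", 4), ("1 Thessalonians", 5), ("2 Thessalonians", 3),
   ("1 Timothy", 6), ("2 Timothy", 4), ("Titus", 3), ("Philemon", 1), ("Hebrews", 13),
   ("James", 5), ("1 Peter", 5), ("2 Peter", 3), ("1 John", 5), ("2 John", 1), ("3 John", 1),
   ("Jude", 1), ("Revelation", 22)]

-- ===== PORT A =====
def citations_for_one_book (book : String) (citations : List (String × List (Int × List (List (String × String))))) : String :=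
  let chapters := PySem.Dict.mk bookChapterCounts
  let citation_html := ""
  let citation_html := citation_html ++ "  <details class=\"citations article\">\n"
  let citation_html := citation_html ++ ("    <summary><h2>" ++ book ++ "</h2></summary>\n")
  let citation_html := citation_html ++ "      <p><ul>\n"
  -- citations[book] raises KeyError when book is absent: excluded by Pre_; the default [] is never read inside Pre_
  let book_citations := PySem.Dict.mk ((PySem.Dict.mk citations).getD book [])
  -- chapters[book] raises KeyError when book is absent: excluded by Pre_
  let citation_html := (PySem.List.pyRange 1 (chapters.getD book 0 + 1) 1).foldl
    (fun citation_html chapter =>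
      if book_citations.contains chapter then
        let book_chapter_citations := book_citations.getD chapter []
        let citation_html := citation_html ++ ("        <li>Chapter " ++ PySem.Int.toStr chapter ++ "\n        <ul>\n")
        let citation_html := book_chapter_citations.foldl
          (fun citation_html citation =>
            -- citation['filename'] / citation['title'] raise KeyError when absent: excluded by Pre_
            let file := (PySem.Dict.mk citation).getD "filename" ""
            let title := (PySem.Dict.mk citation).getD "title" ""
            citation_html ++ ("            <li><a href=\"" ++ file ++ "\">" ++ title ++ "</a></li>\n"))
          citation_html
        citation_html ++ "          </ul>\n        </li>\n"
      else citation_html)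
    citation_html
  let citation_html := citation_html ++ "      </ul></p>\n"
  let citation_html := citation_html ++ "    </summary>\n"
  citation_html ++ "  </details>\n"

-- ===== PORT B =====
-- one <li> block for a cited chapter (Source B's chapter_block)
def pvChapterBlock (book_citations : PySem.Dict Int (List (List (String × String)))) (ch : Int) : String :=
  let items := PySem.Str.join "" ((book_citations.getD ch []).map (fun c =>
    "            <li><a href=\"" ++ (PySem.Dict.mk c).getD "filename" "" ++ "\">" ++
      (PySem.Dict.mk c).getD "title" "" ++ "</a></li>\n"))
  "        <li>Chapter " ++ PySem.Int.toStr ch ++ "\n        <ul>\n" ++ items ++ "          </ul>\n        </li>\n"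

def citations_for_one_book_alt (book : String) (citations : List (String × List (Int × List (List (String × String))))) : String :=
  let n := (PySem.Dict.mk bookChapterCounts).getD book 0
  let book_citations := PySem.Dict.mk ((PySem.Dict.mk citations).getD book [])
  -- 'for ch in book_citations' iterates the dict's (distinct, first-occurrence) keys
  let present := PySem.List.sorted
    ((PySem.List.dedup book_citations.keys).filter (fun ch => decide (1 ≤ ch ∧ ch ≤ n)))
    (fun x => x) false
  "  <details class=\"citations article\">\n"
    ++ ("    <summary><h2>" ++ book ++ "</h2></summary>\n")
    ++ "      <p><ul>\n"
    ++ PySem.Str.join "" (present.map (pvChapterBlock book_citations))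
    ++ "      </ul></p>\n"
    ++ "    </summary>\n"
    ++ "  </details>\n"

-- ===== PRECONDITION & SPEC =====
-- Pre_ = exactly where the Python returns (no KeyError): book is a known Bible book, book is a
-- key of citations, and every citation reachable through an in-range cited chapter has both
-- 'filename' and 'title' keys.
def Pre_citations_for_one_book (book : String) (citations : List (String × List (Int × List (List (String × String))))) : Prop :=
  book ∈ bookChapterCounts.map Prod.fst ∧
  book ∈ citations.map Prod.fst ∧
  (∀ p ∈ (PySem.Dict.mk citations).getD book [],
    ((PySem.Dict.mk ((PySem.Dict.mk citations).getD book [])).get? p.1 = some p.2 ∧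
      1 ≤ p.1 ∧ p.1 ≤ (PySem.Dict.mk bookChapterCounts).getD book 0) →
    ∀ c ∈ p.2, (PySem.Dict.mk c).contains "filename" = true ∧ (PySem.Dict.mk c).contains "title" = true)
instance (book : String) (citations : List (String × List (Int × List (List (String × String))))) : Decidable (Pre_citations_for_one_book book citations) := by unfold Pre_citations_for_one_book; infer_instance

def pvWitness_citations_for_one_book : String × (List (String × List (Int × List (List (String × String))))) :=
  ("Jude", [("Jude", [(1, [[("filename", "a.html"), ("title", "T")]])])])

def Spec_citations_for_one_book (book : String) (citations : List (String × List (Int × List (List (String × String))))) (out : String) : Prop := out = citations_for_one_book_alt book citations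
instance (book : String) (citations : List (String × List (Int × List (List (String × String))))) (out : String) : Decidable (Spec_citations_for_one_book book citations out) := by unfold Spec_citations_for_one_book; infer_instance

-- ===== CLAIM (what is proved, stated in full; the proofs are below) =====
def Claim_equal_citations_for_one_book : Prop := ∀ (book : String) (citations : List (String × List (Int × List (List (String × String))))), Dom_citations_for_one_book book citations → Pre_citations_for_one_book book citations → Spec_citations_for_one_book book citations (citations_for_one_book book citations)

-- ===== LEMMAS AND PROOFS =====

-- ''.join of a cons, at the String level
lemma str_join0_cons (x : String) (xs : List String) :
    PySem.Str.join "" (x :: xs) = x ++ PySem.Str.join "" xs := by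
  cases xs with
  | nil => simp [PySem.Str.join, PySem.Chars.join, List.intercalate]
  | cons y ys => simp [PySem.Str.join, PySem.Chars.join_cons_cons, String.ofList_append]

lemma str_join0_nil : PySem.Str.join "" ([] : List String) = "" := by
  simp [PySem.Str.join, PySem.Chars.join, List.intercalate]

-- 'acc += f(x)' loop = acc ++ ''.join(map f l)
lemma foldl_str_append {α : Type} (l : List α) (f : α → String) (a : String) :
    l.foldl (fun acc c => acc ++ f c) a = a ++ PySem.Str.join "" (l.map f) := by
  induction l generalizing a with
  | nil => simp [str_join0_nil]
  | cons x xs ih => simp [List.foldl_cons, ih, str_join0_cons, String.append_assoc]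

-- A's outer loop, flattened to a join over the membership-filtered range
lemma foldl_outer (d : PySem.Dict Int (List (List (String × String)))) (l : List Int) (a : String) :
    l.foldl
      (fun citation_html chapter =>
        if d.contains chapter then
          let book_chapter_citations := d.getD chapter []
          let citation_html := citation_html ++ ("        <li>Chapter " ++ PySem.Int.toStr chapter ++ "\n        <ul>\n")
          let citation_html := book_chapter_citations.foldl
            (fun citation_html citation =>
              let file := (PySem.Dict.mk citation).getD "filename" ""
              let title := (PySem.Dict.mk citation).getD "title" ""
              citation_html ++ ("            <li><a href=\"" ++ file ++ "\">" ++ title ++ "</a></li>\n"))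
            citation_html
          citation_html ++ "          </ul>\n        </li>\n"
        else citation_html)
      a
    = a ++ PySem.Str.join "" (((l.filter (fun ch => d.contains ch)).map (pvChapterBlock d))) := by
  induction l generalizing a with
  | nil => simp [str_join0_nil]
  | cons x xs ih =>
    simp only [List.foldl_cons]
    by_cases h : d.contains x = true
    · rw [if_pos h, ih, foldl_str_append, List.filter_cons_of_pos h]
      simp [pvChapterBlock, str_join0_cons, String.append_assoc]
    · rw [if_neg h, ih, List.filter_cons_of_neg h]

-- B's sorted cited-chapter list IS the membership-filtered range
lemma present_eq (d : PySem.Dict Int (List (List (String × String)))) (n : Int) :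
    PySem.List.sorted ((PySem.List.dedup d.keys).filter (fun ch => decide (1 ≤ ch ∧ ch ≤ n)))
      (fun x => x) false
    = (PySem.List.pyRange 1 (n + 1) 1).filter (fun ch => d.contains ch) := by
  apply PySem.List.sorted_eq_of_perm_of_pairwise_lt
  · apply (List.perm_ext_iff_of_nodup ?_ ?_).mpr
    · intro x
      simp only [List.mem_filter, PySem.List.mem_dedup, PySem.List.mem_pyRange_one,
        PySem.Dict.contains_eq_decide_mem_keys, decide_eq_true_eq]
      constructor
      · rintro ⟨⟨h1, h2⟩, hk⟩; exact ⟨hk, h1, by omega⟩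
      · rintro ⟨hk, h1, h2⟩; exact ⟨⟨h1, by omega⟩, hk⟩
    · exact ((PySem.List.nodup_pyRange_one 1 (n + 1)).filter _)
    · exact ((PySem.List.nodup_dedup d.keys).filter _)
  · exact (PySem.List.pairwise_lt_pyRange_one 1 (n + 1)).sublist List.filter_sublist

lemma citations_for_one_book_eq_alt (book : String)
    (citations : List (String × List (Int × List (List (String × String))))) :
    citations_for_one_book book citations = citations_for_one_book_alt book citations := by
  unfold citations_for_one_book citations_for_one_book_alt
  simp only [foldl_outer, present_eq]
  simp [String.append_assoc, String.empty_append]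

-- ===== VERDICT (by name: the statement is the Claim_ definition above) =====
theorem citations_for_one_book_spec : Claim_equal_citations_for_one_book := by
  intro book citations _ _
  unfold Spec_citations_for_one_book
  exact citations_for_one_book_eq_alt book citations
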